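-- pv_equiv track=rewrite | github.com/habvi/42_push_swap | python/main.py | erase_unnecessary_op
-- ===== SOURCE A (Python) =====
-- def erase_pair_op(r_count, erase_1, erase_2, new_op):
--     while r_count[0] and r_count[1]:
--         r_count[0] -= 1
--         r_count[1] -= 1
--     new_op.extend([erase_1] * r_count[0])
--     new_op.extend([erase_2] * r_count[1])
--     return r_count, new_op
--
-- def erase_unnecessary_op(op, erase_1, erase_2):
--     new_op = []
--     r_count = [0] * 2
--     for s in op:
--         if s in ("sa", "sb", "ss", "pa", "pb"):
--             r_count, new_op = erase_pair_op(r_count, erase_1, erase_2, new_op)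
--             r_count = [0] * 2
--             new_op.append(s)
--             continue
--         if s == erase_1:
--             r_count[0] += 1
--         elif s == erase_2:
--             r_count[1] += 1
--         else:
--             new_op.append(s)
--     r_count, new_op = erase_pair_op(r_count, erase_1, erase_2, new_op)
--     return new_op
-- ===== SOURCE B (Python) =====
-- BARRIERS = ("sa", "sb", "ss", "pa", "pb")
--
-- def _flush(out, seg, e1, e2):
--     # cancel matched pairs of e1/e2 in the segment; keep other ops first, leftovers after
--     c1 = seg.count(e1)
--     c2 = 0 if e2 == e1 else seg.count(e2)
--     m = min(c1, c2)
--     out += [x for x in seg if x != e1 and x != e2]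
--     out += [e1] * (c1 - m) + [e2] * (c2 - m)
--
-- def erase_unnecessary_op(op, erase_1, erase_2):
--     out = []
--     seg = []
--     for s in op:
--         if s in BARRIERS:
--             _flush(out, seg, erase_1, erase_2)
--             out.append(s)
--             seg = []
--         else:
--             seg.append(s)
--     _flush(out, seg, erase_1, erase_2)
--     return out
-- ===== Notes on version B (the rewrite author's own statement) =====
-- stated objective: alternative
-- what changed: B splits the op list into barrier-delimited segments and resolves each segment at once with count/min/filter, instead of A's flat pass that maintains running counters and flushes them via a decrementing while-loop.
import Mathlib
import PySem

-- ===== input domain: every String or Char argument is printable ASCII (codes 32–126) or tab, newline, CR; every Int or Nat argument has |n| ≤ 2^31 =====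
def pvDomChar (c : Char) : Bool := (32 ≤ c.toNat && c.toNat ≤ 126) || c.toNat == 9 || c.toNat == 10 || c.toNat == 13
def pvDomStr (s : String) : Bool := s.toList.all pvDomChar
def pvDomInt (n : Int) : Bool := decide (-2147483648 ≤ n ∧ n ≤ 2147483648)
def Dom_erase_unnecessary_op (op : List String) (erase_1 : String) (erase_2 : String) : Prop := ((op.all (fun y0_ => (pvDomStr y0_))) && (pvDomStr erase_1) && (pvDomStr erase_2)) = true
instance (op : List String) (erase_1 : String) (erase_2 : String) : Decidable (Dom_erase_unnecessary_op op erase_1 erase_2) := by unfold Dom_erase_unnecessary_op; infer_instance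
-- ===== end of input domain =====

-- B resolves each barrier-delimited segment at once (count/min/filter) instead of A's flat
-- counter-with-while-flush pass; objective: alternative decomposition, same cost.

-- ===== PORT A =====
-- the 'while r_count[0] and r_count[1]' loop of erase_pair_op
def erasePairLoop : Nat → Nat → Nat × Nat
  | c1+1, c2+1 => erasePairLoop c1 c2
  | c1, c2 => (c1, c2)

def erase_pair_op (c1 c2 : Nat) (erase_1 erase_2 : String) (new_op : List String) :
    (Nat × Nat) × List String :=
  let p := erasePairLoop c1 c2
  ((p.1, p.2), new_op ++ List.replicate p.1 erase_1 ++ List.replicate p.2 erase_2)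

-- the 'for s in op' loop of erase_unnecessary_op, then the final flush
def eraseLoopA (erase_1 erase_2 : String) : List String → Nat → Nat → List String → List String
  | [], c1, c2, new_op => (erase_pair_op c1 c2 erase_1 erase_2 new_op).2
  | s :: rest, c1, c2, new_op =>
    if s == "sa" || s == "sb" || s == "ss" || s == "pa" || s == "pb" then
      eraseLoopA erase_1 erase_2 rest 0 0 ((erase_pair_op c1 c2 erase_1 erase_2 new_op).2 ++ [s])
    else if s == erase_1 then
      eraseLoopA erase_1 erase_2 rest (c1 + 1) c2 new_op
    else if s == erase_2 then
      eraseLoopA erase_1 erase_2 rest c1 (c2 + 1) new_op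
    else
      eraseLoopA erase_1 erase_2 rest c1 c2 (new_op ++ [s])

def erase_unnecessary_op (op : List String) (erase_1 : String) (erase_2 : String) : List String :=
  eraseLoopA erase_1 erase_2 op 0 0 []

-- ===== PORT B =====
-- Source B's _flush: resolve one whole segment at once
def flushSeg (out seg : List String) (e1 e2 : String) : List String :=
  let c1 := seg.count e1
  let c2 := if e2 == e1 then 0 else seg.count e2
  let m := min c1 c2
  out ++ seg.filter (fun x => !(x == e1) && !(x == e2)) ++
    List.replicate (c1 - m) e1 ++ List.replicate (c2 - m) e2

-- Source B's main loop: accumulate a segment, flush it at each barrier and at the end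
def eraseLoopB (e1 e2 : String) : List String → List String → List String → List String
  | [], out, seg => flushSeg out seg e1 e2
  | s :: rest, out, seg =>
    if s == "sa" || s == "sb" || s == "ss" || s == "pa" || s == "pb" then
      eraseLoopB e1 e2 rest (flushSeg out seg e1 e2 ++ [s]) []
    else
      eraseLoopB e1 e2 rest out (seg ++ [s])

def erase_unnecessary_op_alt (op : List String) (erase_1 : String) (erase_2 : String) : List String :=
  eraseLoopB erase_1 erase_2 op [] []

-- ===== PRECONDITION & SPEC =====
def Spec_erase_unnecessary_op (op : List String) (erase_1 : String) (erase_2 : String) (out : List String) : Prop := out = erase_unnecessary_op_alt op erase_1 erase_2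
instance (op : List String) (erase_1 : String) (erase_2 : String) (out : List String) : Decidable (Spec_erase_unnecessary_op op erase_1 erase_2 out) := by unfold Spec_erase_unnecessary_op; infer_instance

-- ===== CLAIM (what is proved, stated in full; the proofs are below) =====
def Claim_equal_erase_unnecessary_op : Prop := ∀ (op : List String) (erase_1 : String) (erase_2 : String), Dom_erase_unnecessary_op op erase_1 erase_2 → Spec_erase_unnecessary_op op erase_1 erase_2 (erase_unnecessary_op op erase_1 erase_2)

-- ===== LEMMAS AND PROOFS =====

lemma erasePairLoop_eq (a b : Nat) : erasePairLoop a b = (a - b, b - a) := by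
  induction a generalizing b with
  | zero => cases b <;> simp [erasePairLoop]
  | succ a ih =>
    cases b with
    | zero => simp [erasePairLoop]
    | succ b => simpa [erasePairLoop] using ih b

-- A's flush, fed the counters and accumulator B's state denotes, equals B's flush
lemma flush_eq (e1 e2 : String) (out seg : List String) :
    (erase_pair_op (seg.count e1) (if e2 == e1 then 0 else seg.count e2) e1 e2
      (out ++ seg.filter (fun x => !(x == e1) && !(x == e2)))).2
    = flushSeg out seg e1 e2 := by
  simp only [erase_pair_op, flushSeg, erasePairLoop_eq]
  have ha : ∀ a b : Nat, a - b = a - min a b := fun a b => by omega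
  have hb : ∀ a b : Nat, b - a = b - min a b := fun a b => by omega
  rw [← ha, ← hb]

-- the main invariant: A's running state vs B's (out, seg) state
lemma loop_eq (e1 e2 : String) (l : List String) : ∀ (out seg : List String),
    eraseLoopA e1 e2 l (seg.count e1) (if e2 == e1 then 0 else seg.count e2)
      (out ++ seg.filter (fun x => !(x == e1) && !(x == e2)))
    = eraseLoopB e1 e2 l out seg := by
  induction l with
  | nil => intro out seg; simpa [eraseLoopA, eraseLoopB] using flush_eq e1 e2 out seg
  | cons s rest ih =>
    intro out seg
    simp only [eraseLoopA, eraseLoopB]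
    by_cases hb : (s == "sa" || s == "sb" || s == "ss" || s == "pa" || s == "pb") = true
    · rw [if_pos hb, if_pos hb, flush_eq]
      simpa using ih (flushSeg out seg e1 e2 ++ [s]) []
    · rw [if_neg hb, if_neg hb]
      by_cases h1 : (s == e1) = true
      · have hs : s = e1 := by simpa using h1
        rw [if_pos h1]
        by_cases he : (e2 == e1) = true
        · simpa [hs, he, List.count_append, List.count_singleton] using ih out (seg ++ [s])
        · have hne : ¬ (e1 == e2) = true := by
            intro h; exact he (by simpa using (beq_iff_eq.mp h).symm)
          simpa [hs, he, hne, List.count_append, List.count_singleton] using ih out (seg ++ [s])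
      · rw [if_neg h1]
        by_cases h2 : (s == e2) = true
        · have hs : s = e2 := by simpa using h2
          rw [if_pos h2]
          have he : ¬ (e2 == e1) = true := by
            intro h; exact h1 (by simpa [hs] using (beq_iff_eq.mp h))
          simpa [hs, he, h1, List.count_append, List.count_singleton] using ih out (seg ++ [s])
        · rw [if_neg h2]
          simpa [h1, h2, List.count_append, List.count_singleton] using ih out (seg ++ [s])

-- ===== VERDICT (by name: the statement is the Claim_ definition above) =====
theorem erase_unnecessary_op_spec : Claim_equal_erase_unnecessary_op := by
  intro op e1 e2 _
  show _ = _
  simpa [erase_unnecessary_op, erase_unnecessary_op_alt] using loop_eq e1 e2 op [] []
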